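-- pv_equiv track=rewrite | github.com/k4ntz/OC_Atari | ocatari/ram/beamrider.py | _get_x_position
-- ===== SOURCE A (Python) =====
-- def _get_x_position(ramstate):
--     """
--     converts the x Position in the RAM to the proper Position on screen
--     """
--     pos = 26
--     for i in range(ramstate-94):
--         if i % 2 == 0:
--             pos = pos+1
--         else:
--             pos = pos+2
--     return pos
-- ===== SOURCE B (Python) =====
-- def _get_x_position(ramstate):
--     """
--     converts the x Position in the RAM to the proper Position on screen
--     """
--     n = ramstate - 94
--     if n < 0:
--         n = 0
--     return 26 + (n + 1) // 2 + 2 * (n // 2)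
-- ===== Notes on version B (the rewrite author's own statement) =====
-- stated objective: faster
-- what changed: Replaced the linear loop that alternately increments the position by one and by two with a single closed-form arithmetic expression (base offset plus ceil and floor halves of the clamped step count).
import Mathlib
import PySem

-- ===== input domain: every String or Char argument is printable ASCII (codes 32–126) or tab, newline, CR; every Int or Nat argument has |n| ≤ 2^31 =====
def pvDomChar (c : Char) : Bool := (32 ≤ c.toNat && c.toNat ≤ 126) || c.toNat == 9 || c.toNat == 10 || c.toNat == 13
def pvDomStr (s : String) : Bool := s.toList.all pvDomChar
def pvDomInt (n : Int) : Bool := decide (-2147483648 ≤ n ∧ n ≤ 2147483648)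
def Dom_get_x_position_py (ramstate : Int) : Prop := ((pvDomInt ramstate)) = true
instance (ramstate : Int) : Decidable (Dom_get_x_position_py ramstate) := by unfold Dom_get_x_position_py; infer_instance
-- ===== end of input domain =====

-- B replaces A's O(n) step loop by the closed form 26 + (n+1)//2 + 2*(n//2), n = max(0, ramstate-94).

-- ===== PORT A =====
def get_x_position_py (ramstate : Int) : Int :=
  (PySem.List.pyRange 0 (ramstate - 94) 1).foldl
    (fun pos i => if PySem.Int.mod i 2 = 0 then pos + 1 else pos + 2) 26

-- ===== PORT B =====
def get_x_position_py_alt (ramstate : Int) : Int :=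
  let n : Int := if ramstate - 94 < 0 then 0 else ramstate - 94
  26 + PySem.Int.floordiv (n + 1) 2 + 2 * PySem.Int.floordiv n 2

-- ===== PRECONDITION & SPEC =====
def Spec_get_x_position_py (ramstate : Int) (out : Int) : Prop := out = get_x_position_py_alt ramstate
instance (ramstate : Int) (out : Int) : Decidable (Spec_get_x_position_py ramstate out) := by unfold Spec_get_x_position_py; infer_instance

-- ===== CLAIM (what is proved, stated in full; the proofs are below) =====
def Claim_equal_get_x_position_py : Prop := ∀ (ramstate : Int), Dom_get_x_position_py ramstate → Spec_get_x_position_py ramstate (get_x_position_py ramstate)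

-- ===== LEMMAS AND PROOFS =====

-- The loop over range(n), started from any p, adds ceil(n/2) ones and floor(n/2) twos.
theorem pv_loop_closed (n : Nat) (p : Int) :
    (PySem.List.pyRange 0 (n : Int) 1).foldl
      (fun pos i => if PySem.Int.mod i 2 = 0 then pos + 1 else pos + 2) p
    = p + ((n + 1) / 2 : Nat) + 2 * ((n / 2 : Nat) : Int) := by
  induction n generalizing p with
  | zero => simp [PySem.List.pyRange_one_eq_nil]
  | succ m ih =>
    rw [show ((m + 1 : Nat) : Int) = (m : Int) + 1 by push_cast; ring,
        PySem.List.pyRange_one_succ_right (by positivity)]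
    rw [List.foldl_append, ih]
    simp only [List.foldl_cons, List.foldl_nil]
    have hmod : PySem.Int.mod (m : Int) 2 = ((m % 2 : Nat) : Int) := by
      exact_mod_cast PySem.Int.mod_natCast m 2
    rcases Nat.even_or_odd m with ⟨k, hk⟩ | ⟨k, hk⟩ <;> subst hk <;>
      simp only [hmod] <;> push_cast <;> omega

theorem get_x_position_eq (ramstate : Int) :
    get_x_position_py ramstate = get_x_position_py_alt ramstate := by
  unfold get_x_position_py get_x_position_py_alt
  by_cases h : ramstate - 94 < 0
  · rw [PySem.List.pyRange_one_eq_nil (by omega)]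
    simp [h, PySem.Int.floordiv]
  · have h0 : (0 : Int) ≤ ramstate - 94 := by omega
    obtain ⟨n, hn⟩ : ∃ n : Nat, ramstate - 94 = (n : Int) :=
      ⟨(ramstate - 94).toNat, (Int.toNat_of_nonneg h0).symm⟩
    rw [hn, pv_loop_closed]
    show _ = 26 + PySem.Int.floordiv (((n:Int)) + 1) 2 + 2 * PySem.Int.floordiv ((n:Int)) 2
    rw [PySem.Int.floordiv_eq_ediv_of_pos (b := 2) (by omega),
        PySem.Int.floordiv_eq_ediv_of_pos (b := 2) (by omega)]
    omega

-- ===== VERDICT (by name: the statement is the Claim_ definition above) =====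
theorem get_x_position_py_spec : Claim_equal_get_x_position_py := by
  intro r _
  unfold Spec_get_x_position_py
  exact get_x_position_eq r
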